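-- pv_equiv track=rewrite | github.com/adnantabda/Competitive-Programming | C_Odd_Even_Increments.py | incre
-- ===== SOURCE A (Python) =====
-- def incre(a):
--     first = a[0]
--     second = a[1]
--     for i in range(2, len(a)):
--         if i % 2 == 0:
--             if a[i] % 2 != first % 2:
--                 return "NO"
--         else:
--             if a[i] % 2 != second % 2:
--                 return "NO"
--
--     return "YES"
-- ===== SOURCE B (Python) =====
-- def incre(a):
--     fp = a[0] % 2
--     sp = a[1] % 2
--     rest = a[2:]
--     n = len(rest)
--     i = 0
--     while i + 1 < n:
--         if rest[i] % 2 != fp or rest[i + 1] % 2 != sp: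
--             return "NO"
--         i += 2
--     if i < n and rest[i] % 2 != fp:
--         return "NO"
--     return "YES"
-- ===== Notes on version B (the rewrite author's own statement) =====
-- stated objective: alternative
-- what changed: Replaces A's single index loop that branches on i % 2 at every step by a two-at-a-time pass over a[2:] that checks one (even-position, odd-position) pair per iteration, with a separate trailing-element check.
import Mathlib
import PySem

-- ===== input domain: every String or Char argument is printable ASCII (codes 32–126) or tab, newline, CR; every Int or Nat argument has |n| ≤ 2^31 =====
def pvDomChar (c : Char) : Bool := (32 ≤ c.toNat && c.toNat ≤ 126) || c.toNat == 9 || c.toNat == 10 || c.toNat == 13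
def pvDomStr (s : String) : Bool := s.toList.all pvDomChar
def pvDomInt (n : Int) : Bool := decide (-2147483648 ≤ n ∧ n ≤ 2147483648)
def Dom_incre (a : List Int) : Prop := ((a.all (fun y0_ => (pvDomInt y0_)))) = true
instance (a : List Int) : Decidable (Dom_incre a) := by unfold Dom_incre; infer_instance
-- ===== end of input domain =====

-- B trades A's per-index parity branching for a two-at-a-time pass over a[2:]; return value only, no side effects.

-- ===== PORT A =====
-- A's for-loop over range(2, len(a)) with early return, as structural recursion on the index.
def increLoop (a : List Int) (first second : Int) (i : Nat) : String :=
  if h : i < a.length then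
    if i % 2 = 0 then
      if PySem.Int.mod a[i] 2 ≠ PySem.Int.mod first 2 then "NO"
      else increLoop a first second (i + 1)
    else
      if PySem.Int.mod a[i] 2 ≠ PySem.Int.mod second 2 then "NO"
      else increLoop a first second (i + 1)
  else "YES"
termination_by a.length - i

def incre (a : List Int) : String :=
  let first := PySem.List.pyGetD a 0 0    -- a[0]; total under Pre_incre
  let second := PySem.List.pyGetD a 1 0   -- a[1]; total under Pre_incre
  increLoop a first second 2

-- ===== PORT B =====
-- B's while-loop consuming two elements of rest per step; [x] is B's trailing 'i < n' check.
def altPairs (fp sp : Int) : List Int → Bool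
  | [] => true
  | [x] => PySem.Int.mod x 2 == fp
  | x :: y :: rs =>
      if PySem.Int.mod x 2 ≠ fp ∨ PySem.Int.mod y 2 ≠ sp then false
      else altPairs fp sp rs

def incre_alt (a : List Int) : String :=
  let fp := PySem.Int.mod (PySem.List.pyGetD a 0 0) 2
  let sp := PySem.Int.mod (PySem.List.pyGetD a 1 0) 2
  if altPairs fp sp (a.drop 2) then "YES" else "NO"   -- a[2:] = a.drop 2 (PySem.List.slice_from_natCast)

-- ===== PRECONDITION & SPEC =====
-- Pre_ excludes lists of length < 2, on which A (and B) raise IndexError at a[0]/a[1].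
def Pre_incre (a : List Int) : Prop := 2 ≤ a.length
instance (a : List Int) : Decidable (Pre_incre a) := by unfold Pre_incre; infer_instance
def pvWitness_incre : List Int := [1, 2, 3, 4]

def Spec_incre (a : List Int) (out : String) : Prop := out = incre_alt a
instance (a : List Int) (out : String) : Decidable (Spec_incre a out) := by unfold Spec_incre; infer_instance

-- ===== CLAIM (what is proved, stated in full; the proofs are below) =====
def Claim_equal_incre : Prop := ∀ (a : List Int), Dom_incre a → Pre_incre a → Spec_incre a (incre a)

-- ===== LEMMAS AND PROOFS =====

-- PySem.Int.mod with positive literal divisor 2 is Lean's % (cited library fact).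
theorem mod2_eq (z : Int) : PySem.Int.mod z 2 = z % 2 :=
  PySem.Int.mod_eq_emod_of_pos (by omega)

-- A's loop from an even index i equals B's pair scan over a.drop i.
theorem loop_eq : ∀ (n : Nat) (rest a : List Int) (first second : Int) (i : Nat),
    rest.length ≤ n → a.drop i = rest → i % 2 = 0 →
    increLoop a first second i =
      (if altPairs (PySem.Int.mod first 2) (PySem.Int.mod second 2) rest then "YES" else "NO") := by
  intro n
  induction n with
  | zero =>
    intro rest a first second i hlen hdrop _
    match rest, hlen with
    | [], _ =>
      have hge : a.length ≤ i := List.drop_eq_nil_iff.mp hdrop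
      unfold increLoop
      simp [altPairs, Nat.not_lt.mpr hge]
  | succ n ih =>
    intro rest a first second i hlen hdrop hpar
    match rest, hlen with
    | [], _ =>
      have hge : a.length ≤ i := List.drop_eq_nil_iff.mp hdrop
      unfold increLoop
      simp [altPairs, Nat.not_lt.mpr hge]
    | [x], _ =>
      have hlt : i < a.length := by
        by_contra hc
        rw [List.drop_eq_nil_iff.mpr (by omega)] at hdrop
        exact absurd hdrop (by simp)
      rw [List.drop_eq_getElem_cons hlt] at hdrop
      simp only [List.cons.injEq] at hdrop
      obtain ⟨hx, hnext⟩ := hdrop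
      have hge1 : a.length ≤ i + 1 := List.drop_eq_nil_iff.mp hnext
      unfold increLoop
      rw [dif_pos hlt, if_pos hpar, hx]
      simp only [mod2_eq]
      by_cases hmx : x % 2 = first % 2
      · rw [if_neg (by simp [hmx])]
        unfold increLoop
        simp [altPairs, Nat.not_lt.mpr hge1, hmx]
      · rw [if_pos hmx]
        simp [altPairs, hmx]
    | x :: y :: rs, hlen2 =>
      have hlt : i < a.length := by
        by_contra hc
        rw [List.drop_eq_nil_iff.mpr (by omega)] at hdrop
        exact absurd hdrop (by simp)
      rw [List.drop_eq_getElem_cons hlt] at hdrop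
      simp only [List.cons.injEq] at hdrop
      obtain ⟨hx, hdrop1⟩ := hdrop
      have hlt1 : i + 1 < a.length := by
        by_contra hc
        rw [List.drop_eq_nil_iff.mpr (by omega)] at hdrop1
        exact absurd hdrop1 (by simp)
      rw [List.drop_eq_getElem_cons hlt1] at hdrop1
      simp only [List.cons.injEq] at hdrop1
      obtain ⟨hy, hdrop2⟩ := hdrop1
      have hpar1 : (i + 1) % 2 ≠ 0 := by omega
      have htail := ih rs a first second (i + 1 + 1)
        (by simp only [List.length_cons] at hlen2; omega) hdrop2 (by omega)
      unfold increLoop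
      rw [dif_pos hlt, if_pos hpar, hx]
      simp only [mod2_eq]
      by_cases hmx : x % 2 = first % 2
      · rw [if_neg (by simp [hmx])]
        unfold increLoop
        rw [dif_pos hlt1, if_neg hpar1, hy]
        simp only [mod2_eq]
        by_cases hmy : y % 2 = second % 2
        · rw [if_neg (by simp [hmy]), htail]
          simp [altPairs, hmx, hmy]
        · rw [if_pos hmy]
          simp [altPairs, hmy]
      · rw [if_pos hmx]
        simp [altPairs, hmx]

-- ===== VERDICT (by name: the statement is the Claim_ definition above) =====
theorem incre_spec : Claim_equal_incre := by
  intro a _ hpre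
  unfold Spec_incre incre incre_alt
  match a, hpre with
  | x :: y :: rs, _ =>
    have h0 : PySem.List.pyGetD (x :: y :: rs) 0 0 = x := by
      simp [pysem]
    have h1 : PySem.List.pyGetD (x :: y :: rs) 1 0 = y :=
      (PySem.List.pyGetD_natCast (xs := x :: y :: rs) (n := 1) (d := 0)).trans rfl
    simpa [h0, h1] using
      loop_eq rs.length rs (x :: y :: rs) x y 2 le_rfl rfl rfl
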